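-- pv_equiv track=rewrite | github.com/Abhilash-du/daily-coding-challenges | DataStructures/Queue/perfectNumbers.py | solve
-- ===== SOURCE A (Python) =====
-- def solve(A):
--     k = 0
--     queue = ["11", "22"]
--     ans = queue[0]
--     k = 0
--     while k != A:
--         ans = queue.pop(0)
--         n = len(ans)
--         mid = n // 2
--         queue.append(ans[0:mid] + "11" + ans[mid:n])
--         queue.append(ans[0:mid] + "22" + ans[mid:n])
--         k += 1
--     return ans
-- ===== SOURCE B (Python) =====
-- def solve(A):
--     if A == 0:
--         return "11"
--     bits = bin(A + 1)[3:]  # binary of A+1 without its leading 1-bit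
--     half = ''.join('2' if b == '1' else '1' for b in bits)
--     return half + half[::-1]
-- ===== Notes on version B (the rewrite author's own statement) =====
-- stated objective: faster
-- what changed: Replaces the BFS queue simulation (A pops with list.pop(0) and middle insertions) by a closed form: the A-th generated string is read off the binary representation of A+1 -- each bit below the leading one picks '1' or '2' for the half-string, which is then mirrored.
import Mathlib
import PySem

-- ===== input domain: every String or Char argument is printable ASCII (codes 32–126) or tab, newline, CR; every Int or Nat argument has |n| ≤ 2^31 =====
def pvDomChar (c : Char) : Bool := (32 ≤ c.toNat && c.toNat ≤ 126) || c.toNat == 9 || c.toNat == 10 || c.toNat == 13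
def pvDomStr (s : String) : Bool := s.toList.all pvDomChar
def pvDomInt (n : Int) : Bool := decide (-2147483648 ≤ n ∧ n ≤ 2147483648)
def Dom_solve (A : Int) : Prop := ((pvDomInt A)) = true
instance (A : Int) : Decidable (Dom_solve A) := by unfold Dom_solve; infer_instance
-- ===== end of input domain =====

-- B replaces A's O(A^2) BFS-queue simulation by an O(log A) closed form: read the
-- half-string off the bits of A+1 below its leading one, then mirror it.

-- ===== PORT A =====
-- ans[0:mid] + ins + ans[mid:n]  (the two queue.append arguments share this shape)
def solveChild (a ins : List Char) : List Char :=
  let n : Int := a.length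
  let mid : Int := PySem.Int.floordiv n 2
  PySem.List.slice a (some 0) (some mid) ++ ins ++ PySem.List.slice a (some mid) (some n)

-- the while loop: for 0 ≤ A it runs exactly A times (k = 0,1,…; for A < 0 Python diverges)
def solveLoop : Nat → List Char → List (List Char) → List Char
  | 0, ans, _ => ans
  | fuel+1, ans, queue =>
    match PySem.List.pop? queue 0 with
    | none => ans  -- Python IndexError; unreachable: the queue is never empty
    | some (a, rest) =>
      solveLoop fuel a (rest ++ [solveChild a ['1','1'], solveChild a ['2','2']])

def solve (A : Int) : String :=
  -- queue = ["11", "22"]; ans = queue[0]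
  String.ofList (solveLoop A.toNat ['1','1'] [['1','1'], ['2','2']])

-- ===== PORT B =====
-- bin(m)[3:]: the binary digits of m below its leading 1-bit (m ≥ 1)
def binTail : Nat → List Char
  | 0 => []
  | 1 => []
  | n+2 => binTail ((n+2)/2) ++ [if (n+2) % 2 = 1 then '1' else '0']
decreasing_by omega

def solve_alt (A : Int) : String :=
  if A = 0 then "11"
  else
    let bits := binTail (A + 1).toNat
    let half := bits.map (fun b => if b = '1' then '2' else '1')
    String.ofList (half ++ half.reverse)

-- ===== PRECONDITION & SPEC =====
-- Pre_ excludes A < 0, on which Python A's while loop never terminates.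
def Pre_solve (A : Int) : Prop := 0 ≤ A
instance (A : Int) : Decidable (Pre_solve A) := by unfold Pre_solve; infer_instance
def pvWitness_solve : Int := (5)

def Spec_solve (A : Int) (out : String) : Prop := out = solve_alt A
instance (A : Int) (out : String) : Decidable (Spec_solve A out) := by unfold Spec_solve; infer_instance

-- ===== CLAIM (what is proved, stated in full; the proofs are below) =====
def Claim_equal_solve : Prop := ∀ (A : Int), Dom_solve A → Pre_solve A → Spec_solve A (solve A)

-- ===== LEMMAS AND PROOFS =====

-- the i-th string popped by A's BFS (i ≥ 1): two roots, node i's parent is (i-1)/2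
def val : Nat → List Char
  | 0 => []
  | 1 => ['1','1']
  | 2 => ['2','2']
  | i+3 => solveChild (val ((i+2)/2)) (if (i+2) % 2 = 0 then ['1','1'] else ['2','2'])
decreasing_by omega

-- B's half-string for node i
def halfOf (i : Nat) : List Char :=
  (binTail (i+1)).map (fun b => if b = '1' then '2' else '1')

theorem val_child_left (t : Nat) :
    val (2*t+3) = solveChild (val (t+1)) ['1','1'] := by
  have h : 2*t+3 = (2*t)+3 := by ring
  rw [h, val]
  have h1 : (2*t+2)/2 = t+1 := by omega
  have h2 : (2*t+2) % 2 = 0 := by omega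
  rw [h1, h2]; simp

theorem val_child_right (t : Nat) :
    val (2*t+4) = solveChild (val (t+1)) ['2','2'] := by
  have h : 2*t+4 = (2*t+1)+3 := by ring
  rw [h, val]
  have h1 : (2*t+3)/2 = t+1 := by omega
  have h2 : (2*t+3) % 2 = 1 := by omega
  rw [h1, h2]; simp

theorem range'_queue (t : Nat) :
    List.range' (t+2) (t+3) = List.range' (t+2) (t+1) ++ [2*t+3, 2*t+4] := by
  have h : t+3 = (t+1)+1+1 := by omega
  rw [h, List.range'_concat, List.range'_concat, List.append_assoc]
  congr 1
  simp
  omega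

theorem loop_val (f : Nat) : ∀ (t : Nat) (ans : List Char),
    solveLoop (f+1) ans ((List.range' (t+1) (t+2)).map val) = val (t+f+1) := by
  induction f with
  | zero =>
    intro t ans
    rw [List.range'_succ, List.map_cons, solveLoop]
    simp [PySem.List.pop?_zero_cons, solveLoop]
  | succ f ih =>
    intro t ans
    rw [List.range'_succ, List.map_cons, solveLoop]
    simp only [PySem.List.pop?_zero_cons]
    have hq : (List.range' (t+2) (t+1)).map val ++
        [solveChild (val (t+1)) ['1','1'], solveChild (val (t+1)) ['2','2']]
        = (List.range' (t+2) (t+3)).map val := by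
      rw [range'_queue, List.map_append]
      simp only [List.map_cons, List.map_nil]
      rw [val_child_left, val_child_right]
    rw [hq, ih (t+1)]
    congr 1
    omega

theorem solve_eq_val (A : Int) (h : 1 ≤ A) : solve A = String.ofList (val A.toNat) := by
  unfold solve
  obtain ⟨f, hf⟩ : ∃ f : Nat, A.toNat = f + 1 := ⟨A.toNat - 1, by omega⟩
  rw [hf]
  have hq : ([['1','1'], ['2','2']] : List (List Char)) = (List.range' 1 2).map val := by
    rw [show List.range' 1 2 = [1, 2] from rfl]
    simp [val]
  rw [hq, loop_val f 0]
  norm_num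

-- the structural heart: each BFS node's string is its half-string followed by its mirror
theorem val_eq_half (i : Nat) (hi : 1 ≤ i) : val i = halfOf i ++ (halfOf i).reverse := by
  induction i using Nat.strong_induction_on with
  | _ i ih =>
    match i, hi with
    | 1, _ => simp [val, halfOf, binTail]
    | 2, _ => simp [val, halfOf, binTail]
    | (j+3), _ =>
      set i := j + 3 with hidef
      have hp : (j+2)/2 = (i-1)/2 := by omega
      set p := (j+2)/2 with hpdef
      have hp1 : 1 ≤ p := by omega
      have hplt : p < i := by omega
      have hvp := ih p hplt hp1
      rw [val]
      rw [← hpdef, hvp]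
      -- compute solveChild on h ++ h.reverse
      set h := halfOf p with hh
      have hlen : ((h ++ h.reverse).length : Int) = 2 * h.length := by
        simp; ring
      have hmid : PySem.Int.floordiv ((h ++ h.reverse).length : Int) 2 = (h.length : Int) := by
        rw [hlen, PySem.Int.floordiv_eq_ediv_of_pos (by norm_num)]
        omega
      have hsl1 : PySem.List.slice (h ++ h.reverse) (some 0)
          (some (PySem.Int.floordiv ((h ++ h.reverse).length : Int) 2)) = h := by
        rw [hmid, PySem.List.slice_zero_start, PySem.List.slice_to_natCast, List.take_left]
      have hsl2 : PySem.List.slice (h ++ h.reverse)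
          (some (PySem.Int.floordiv ((h ++ h.reverse).length : Int) 2))
          (some ((h ++ h.reverse).length : Int)) = h.reverse := by
        rw [hmid, PySem.List.slice_natCast, List.drop_left]
        simp
      -- halfOf i = halfOf p ++ [bit]
      have hbin : binTail (i+1) = binTail (p+1) ++ [if (i+1) % 2 = 1 then '1' else '0'] := by
        have : i + 1 = (i - 1) + 2 := by omega
        rw [this, binTail]
        have h2 : (i-1+2)/2 = p + 1 := by omega
        have h3 : (i-1+2) % 2 = (i+1) % 2 := by omega
        rw [h2, h3]
      have hhalf : halfOf i = h ++ [if (i+1) % 2 = 1 then '2' else '1'] := by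
        rw [hh, halfOf, halfOf, hbin, List.map_append]
        congr 1
        simp only [List.map_cons, List.map_nil]
        by_cases hc : (i+1) % 2 = 1 <;> simp [hc]
      simp only [solveChild, hsl1, hsl2]
      rw [hhalf]
      by_cases hc : (i+1) % 2 = 1
      · have hins : (i - 1) % 2 = 0 → False := by omega
        have : ¬ ((j+2) % 2 = 0) := by omega
        rw [if_neg this]
        simp [hc]
      · have : (j+2) % 2 = 0 := by omega
        rw [if_pos this]
        simp [hc]

theorem solve_alt_eq_half (A : Int) (h : 1 ≤ A) :
    solve_alt A = String.ofList (halfOf A.toNat ++ (halfOf A.toNat).reverse) := by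
  unfold solve_alt
  rw [if_neg (by omega)]
  have : (A+1).toNat = A.toNat + 1 := by omega
  simp only [this]
  rfl

-- ===== VERDICT (by name: the statement is the Claim_ definition above) =====
theorem solve_spec : Claim_equal_solve := by
  intro A _ hpre
  unfold Spec_solve
  by_cases h0 : A = 0
  · subst h0
    rw [solve_alt, if_pos rfl]
    decide
  · have h1 : 1 ≤ A := by unfold Pre_solve at hpre; omega
    rw [solve_eq_val A h1, solve_alt_eq_half A h1,
        val_eq_half A.toNat (by omega)]
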